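-- pv_equiv track=rewrite | github.com/weichert/squadvault | scripts/_patch_sanitize_pythonpath_src_python_literals_in_patchers_v1.py | patch_remove_literal_patcher
-- ===== SOURCE A (Python) =====
-- def patch_remove_literal_patcher(txt: str) -> str:
--     # Eliminate contiguous "PYTHONPATH=src python" in this patcher by building it dynamically.
--     # Replace:
--     #   txt.replace("PYTHONPATH=src python", ...)
--     # with:
--     #   bad = "PYTHONPATH=src " + "python"
--     #   txt.replace(bad, ...)
--     if 'txt.replace("PYTHONPATH=src python"' not in txt and '"PYTHONPATH=src python"' not in txt:
--         return txt
--
--     lines = txt.splitlines(True)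
--     out = []
--     inserted_bad = False
--
--     for line in lines:
--         if (not inserted_bad) and line.startswith("def patch_fix_banner"):
--             out.append('BAD = "PYTHONPATH=src " + "python"\n\n')
--             inserted_bad = True
--         # Rewrite direct literals
--         line = line.replace('txt.replace("PYTHONPATH=src python"', 'txt.replace(BAD')
--         line = line.replace('"PYTHONPATH=src python -m py_compile"', '"PYTHONPATH=src " + "python -m py_compile"')
--         line = line.replace('"PYTHONPATH=src python -m unittest -v"', '"PYTHONPATH=src " + "python -m unittest -v"')
--         line = line.replace('"PYTHONPATH=src python"', '"PYTHONPATH=src " + "python"')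
--         out.append(line)
--
--     return "".join(out)
-- ===== SOURCE B (Python) =====
-- BAD_LINE = 'BAD = "PYTHONPATH=src " + "python"\n\n'
--
--
-- def _sub(s: str) -> str:
--     # The same four rewrites as the original, applied in the same order,
--     # but to a whole chunk of text at once.
--     s = s.replace('txt.replace("PYTHONPATH=src python"', 'txt.replace(BAD')
--     s = s.replace('"PYTHONPATH=src python -m py_compile"', '"PYTHONPATH=src " + "python -m py_compile"')
--     s = s.replace('"PYTHONPATH=src python -m unittest -v"', '"PYTHONPATH=src " + "python -m unittest -v"')
--     s = s.replace('"PYTHONPATH=src python"', '"PYTHONPATH=src " + "python"')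
--     return s
--
--
-- def patch_remove_literal_patcher(txt: str) -> str:
--     if 'txt.replace("PYTHONPATH=src python"' not in txt and '"PYTHONPATH=src python"' not in txt:
--         return txt
--
--     # Phase 1: locate the insertion point (character offset of the first line
--     # that starts with "def patch_fix_banner"), or None if there is none.
--     off = None
--     pre = 0
--     for line in txt.splitlines(True):
--         if line.startswith("def patch_fix_banner"):
--             off = pre
--             break
--         pre += len(line)
--
--     # Phase 2: rewrite the literals globally (no target spans a newline) and
--     # splice the BAD definition in at the located offset.
--     if off is None:
--         return _sub(txt)
--     return _sub(txt[:off]) + BAD_LINE + _sub(txt[off:])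
-- ===== Notes on version B (the rewrite author's own statement) =====
-- stated objective: alternative
-- what changed: A interleaves insertion and four per-line replaces in one loop that rebuilds the text line by line; B first locates the insertion point as a character offset in the original text, then applies the four replaces globally to the two chunks around that offset and splices the BAD line in between (no per-line rebuild).
import Mathlib
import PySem

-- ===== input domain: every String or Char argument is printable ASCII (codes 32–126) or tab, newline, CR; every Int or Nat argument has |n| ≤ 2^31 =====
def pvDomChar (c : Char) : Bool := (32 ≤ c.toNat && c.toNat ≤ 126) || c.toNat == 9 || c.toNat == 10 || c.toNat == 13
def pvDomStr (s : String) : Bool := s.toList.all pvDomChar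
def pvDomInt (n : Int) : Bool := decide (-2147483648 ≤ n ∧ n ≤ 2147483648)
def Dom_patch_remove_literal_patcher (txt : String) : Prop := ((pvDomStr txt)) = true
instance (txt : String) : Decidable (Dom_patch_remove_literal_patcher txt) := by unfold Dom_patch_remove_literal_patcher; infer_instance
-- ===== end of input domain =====

-- B replaces A's single interleaved loop (insert + per-line replaces) by an offset
-- computation on the original text followed by global replaces on the two chunks
-- around the offset; objective: alternative decomposition (same asymptotic cost).

-- shared literal constants of the patcher
def pvOld1 : String := "txt.replace(\"PYTHONPATH=src python\""
def pvNew1 : String := "txt.replace(BAD"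
def pvOld2 : String := "\"PYTHONPATH=src python -m py_compile\""
def pvNew2 : String := "\"PYTHONPATH=src \" + \"python -m py_compile\""
def pvOld3 : String := "\"PYTHONPATH=src python -m unittest -v\""
def pvNew3 : String := "\"PYTHONPATH=src \" + \"python -m unittest -v\""
def pvOld4 : String := "\"PYTHONPATH=src python\""
def pvNew4 : String := "\"PYTHONPATH=src \" + \"python\""
def pvBadLine : String := "BAD = \"PYTHONPATH=src \" + \"python\"\n\n"

-- hand port of str.splitlines(True) (PySem.Chars.splitlines drops the line ends).
-- Exact on the Dom charset: there the only line breaks are '\n', '\r', '\r\n'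
-- (Python's extra break characters \v \f \x1c-\x1e \x85 \u2028 \u2029 are outside Dom).
def pvSplitKeep : List Char → List (List Char)
  | [] => []
  | '\r' :: '\n' :: r => ['\r', '\n'] :: pvSplitKeep r
  | c :: r =>
    if c = '\n' || c = '\r' then [c] :: pvSplitKeep r
    else match pvSplitKeep r with
      | [] => [[c]]
      | l :: ls => (c :: l) :: ls

def pvSplitKeepStr (s : String) : List String := (pvSplitKeep s.toList).map String.ofList

-- ===== PORT A =====
-- A's for-loop: state = (out, inserted_bad); the four replaces are applied per line.
def pvALoop : List String → List String → Bool → List String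
  | [], out, _ => out
  | line :: rest, out, inserted =>
    let p := if !inserted && PySem.Str.startswith line "def patch_fix_banner"
             then (out ++ [pvBadLine], true) else (out, inserted)
    let line1 := PySem.Str.replace line pvOld1 pvNew1
    let line2 := PySem.Str.replace line1 pvOld2 pvNew2
    let line3 := PySem.Str.replace line2 pvOld3 pvNew3
    let line4 := PySem.Str.replace line3 pvOld4 pvNew4
    pvALoop rest (p.1 ++ [line4]) p.2

def patch_remove_literal_patcher (txt : String) : String :=
  if !(PySem.Str.isIn pvOld1 txt) && !(PySem.Str.isIn pvOld4 txt) then txt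
  else PySem.Str.join "" (pvALoop (pvSplitKeepStr txt) [] false)

-- ===== PORT B =====
-- B's _sub: the four replaces chained on a whole chunk of text.
def pvSub (s : String) : String :=
  PySem.Str.replace (PySem.Str.replace (PySem.Str.replace
    (PySem.Str.replace s pvOld1 pvNew1) pvOld2 pvNew2) pvOld3 pvNew3) pvOld4 pvNew4

-- B's offset loop: character offset of the first line starting with the marker.
def pvBFind : List String → Int → Option Int
  | [], _ => none
  | line :: rest, pre =>
    if PySem.Str.startswith line "def patch_fix_banner" then some pre
    else pvBFind rest (pre + PySem.Str.len line)

def patch_remove_literal_patcher_alt (txt : String) : String :=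
  if !(PySem.Str.isIn pvOld1 txt) && !(PySem.Str.isIn pvOld4 txt) then txt
  else match pvBFind (pvSplitKeepStr txt) 0 with
    | none => pvSub txt
    | some off =>
        pvSub (PySem.Str.slice txt none (some off)) ++ pvBadLine
          ++ pvSub (PySem.Str.slice txt (some off) none)

-- ===== PRECONDITION & SPEC =====
def Spec_patch_remove_literal_patcher (txt : String) (out : String) : Prop := out = patch_remove_literal_patcher_alt txt
instance (txt : String) (out : String) : Decidable (Spec_patch_remove_literal_patcher txt out) := by unfold Spec_patch_remove_literal_patcher; infer_instance

-- ===== CLAIM (what is proved, stated in full; the proofs are below) =====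
def Claim_equal_patch_remove_literal_patcher : Prop := ∀ (txt : String), Dom_patch_remove_literal_patcher txt → Spec_patch_remove_literal_patcher txt (patch_remove_literal_patcher txt)

-- ===== LEMMAS AND PROOFS =====

-- break characters and line shapes
def pvIsBrk (c : Char) : Bool := c = '\n' || c = '\r'
def pvBrkFree (l : List Char) : Prop := ∀ c ∈ l, pvIsBrk c = false
def pvLastBrk (l : List Char) : Prop := ∃ l₀ t, pvIsBrk t = true ∧ l = l₀ ++ [t]
def pvGood (ls : List (List Char)) : Prop := ∀ l ∈ ls.dropLast, pvLastBrk l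

-- fuel-free reformulation of PySem.Chars.replace (for old ≠ [])
def pvRep (old new : List Char) : List Char → List Char
  | [] => []
  | c :: t =>
    if old ≠ [] ∧ old <+: (c :: t)
    then new ++ pvRep old new ((c :: t).drop old.length)
    else c :: pvRep old new t
termination_by l => l.length
decreasing_by
  · rename_i h; simp only [List.length_drop, List.length_cons]
    have : old.length ≥ 1 := List.length_pos_of_ne_nil h.1
    omega
  · simp

@[simp] lemma pvRep_nil (old new : List Char) : pvRep old new [] = [] := by rw [pvRep]

lemma pvGo (old new : List Char) (h : old ≠ []) :
    ∀ fuel l acc, l.length ≤ fuel →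
      PySem.Chars.replace.go old new fuel l acc = acc.reverse ++ pvRep old new l := by
  intro fuel
  induction fuel with
  | zero =>
    intro l acc hl
    have hl0 : l = [] := List.eq_nil_of_length_eq_zero (Nat.le_zero.mp hl)
    subst hl0
    simp [PySem.Chars.replace.go]
  | succ n ih =>
    intro l acc hl
    match l with
    | [] => simp [PySem.Chars.replace.go]
    | c :: t =>
      rw [PySem.Chars.replace.go]
      by_cases hp : old.isPrefixOf (c :: t)
      · have hp' : old <+: (c :: t) := List.isPrefixOf_iff_prefix.mp hp
        rw [if_pos hp]
        rw [ih ((c :: t).drop old.length) (new.reverse ++ acc)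
            (by simp only [List.length_drop, List.length_cons]
                have : old.length ≥ 1 := List.length_pos_of_ne_nil h
                simp only [List.length_cons] at hl; omega)]
        rw [pvRep, if_pos ⟨h, hp'⟩]
        simp
      · have hp' : ¬ old <+: (c :: t) := fun hc => hp (List.isPrefixOf_iff_prefix.mpr hc)
        rw [if_neg hp]
        rw [ih t (c :: acc) (by simp only [List.length_cons] at hl; omega)]
        rw [pvRep, if_neg (fun hc => hp' hc.2)]
        simp

lemma pvRep_eq_replace (old new : List Char) (h : old ≠ []) (s : List Char) :
    PySem.Chars.replace s old new = pvRep old new s := by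
  rw [PySem.Chars.replace, if_neg (by simpa using h)]
  simpa using pvGo old new h s.length s [] le_rfl

-- the boundary lemma: a break character no pattern contains splits a replace
lemma pvRep_nil_case (old new : List Char) (ho : old ≠ [])
    (t : Char) (htold : t ∉ old) (b : List Char) :
    pvRep old new (t :: b) = t :: pvRep old new b := by
  rw [pvRep, if_neg ?_]
  rintro ⟨-, hp⟩
  obtain ⟨u, hu⟩ := hp
  match old, ho with
  | c :: old', _ =>
    have : c = t := by simpa using congrArg (·.head?) hu
    exact htold (this ▸ List.mem_cons_self)

lemma pvRep_split (old new : List Char) (ho : old ≠ []) (hb : pvBrkFree old)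
    (t : Char) (ht : pvIsBrk t = true) :
    ∀ (a b : List Char), pvRep old new (a ++ t :: b) = pvRep old new a ++ t :: pvRep old new b := by
  have htold : t ∉ old := fun hm => by rw [hb t hm] at ht; exact Bool.false_ne_true ht
  have hlen1 : old.length ≥ 1 := List.length_pos_of_ne_nil ho
  suffices h : ∀ (n : Nat) (a b : List Char), a.length ≤ n →
      pvRep old new (a ++ t :: b) = pvRep old new a ++ t :: pvRep old new b by
    intro a b; exact h a.length a b le_rfl
  intro n
  induction n with
  | zero =>
    intro a b ha
    have : a = [] := List.eq_nil_of_length_eq_zero (Nat.le_zero.mp ha)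
    subst this
    simpa using pvRep_nil_case old new ho t htold b
  | succ n ih =>
    intro a b ha
    match a with
    | [] => simpa using pvRep_nil_case old new ho t htold b
    | c :: a' =>
      simp only [List.length_cons] at ha
      by_cases hp : old <+: (c :: (a' ++ t :: b))
      · -- the match lies inside c :: a'
        have hol : old.length ≤ a'.length + 1 := by
          by_contra hgt
          rw [not_le] at hgt
          have hidx : old[a'.length + 1]'(by omega) = t := by
            rw [hp.getElem]
            show (((c :: a') ++ (t :: b))[a'.length + 1]'_) = t
            rw [List.getElem_append_right (by simp)]
            simp
          exact htold (hidx ▸ old.getElem_mem _)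
        have hpa : old <+: (c :: a') := by
          have h2 := List.prefix_iff_eq_take.mp hp
          rw [show (c :: (a' ++ t :: b)) = (c :: a') ++ (t :: b) by simp,
            List.take_append_of_le_length (by simpa using hol)] at h2
          exact h2 ▸ List.take_prefix _ _
        show pvRep old new (c :: (a' ++ t :: b)) = _
        rw [pvRep, if_pos ⟨ho, hp⟩]
        have hdrop : (c :: (a' ++ t :: b)).drop old.length
            = ((c :: a').drop old.length) ++ t :: b := by
          rw [show (c :: (a' ++ t :: b)) = (c :: a') ++ (t :: b) by simp]
          exact List.drop_append_of_le_length (by simpa using hol)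
        rw [hdrop, ih _ _ (by simp only [List.length_drop, List.length_cons]; omega)]
        rw [show pvRep old new (c :: a') = new ++ pvRep old new ((c :: a').drop old.length) by
          rw [pvRep, if_pos ⟨ho, hpa⟩]]
        simp
      · show pvRep old new (c :: (a' ++ t :: b)) = _
        rw [pvRep, if_neg (fun hc => hp hc.2)]
        rw [ih a' b (by omega), pvRep, if_neg ?_]
        · simp
        · rintro ⟨-, hpa⟩
          exact hp (hpa.trans ⟨t :: b, by simp⟩)

lemma pvRep_term (old new : List Char) (ho : old ≠ []) (hb : pvBrkFree old)
    (t : Char) (ht : pvIsBrk t = true) (a : List Char) :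
    pvRep old new (a ++ [t]) = pvRep old new a ++ [t] := by
  simpa using pvRep_split old new ho hb t ht a []

lemma pvLastBrk_rep (old new : List Char) (ho : old ≠ []) (hb : pvBrkFree old)
    {l : List Char} (h : pvLastBrk l) : pvLastBrk (pvRep old new l) := by
  obtain ⟨l₀, t, ht, rfl⟩ := h
  exact ⟨pvRep old new l₀, t, ht, pvRep_term old new ho hb t ht l₀⟩

lemma pvGood_map_rep (old new : List Char) (ho : old ≠ []) (hb : pvBrkFree old)
    {ls : List (List Char)} (h : pvGood ls) : pvGood (ls.map (pvRep old new)) := by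
  intro l hl
  rw [← List.map_dropLast] at hl
  obtain ⟨x, hx, rfl⟩ := List.mem_map.mp hl
  exact pvLastBrk_rep old new ho hb (h x hx)

lemma pvRep_flatten (old new : List Char) (ho : old ≠ []) (hb : pvBrkFree old) :
    ∀ (ls : List (List Char)), pvGood ls →
      pvRep old new ls.flatten = (ls.map (pvRep old new)).flatten := by
  intro ls
  induction ls with
  | nil => simp
  | cons l rest ih =>
    intro h
    match rest with
    | [] => simp
    | l2 :: r2 =>
      have hl : pvLastBrk l := h l (by rw [List.dropLast_cons_of_ne_nil (by simp)]; simp)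
      obtain ⟨l₀, t, ht, rfl⟩ := hl
      have hrest : pvGood (l2 :: r2) := by
        intro x hx
        exact h x (by rw [List.dropLast_cons_of_ne_nil (by simp)]; simp [hx])
      calc pvRep old new (((l₀ ++ [t]) :: l2 :: r2).flatten)
          = pvRep old new (l₀ ++ t :: (l2 :: r2).flatten) := by simp
        _ = pvRep old new l₀ ++ t :: pvRep old new ((l2 :: r2).flatten) :=
            pvRep_split old new ho hb t ht _ _
        _ = (((l₀ ++ [t]) :: l2 :: r2).map (pvRep old new)).flatten := by
            rw [ih hrest]
            simp [pvRep_term old new ho hb t ht l₀]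

-- the four replaces chained, on the character level
def pvSubC (s : List Char) : List Char :=
  pvRep pvOld4.toList pvNew4.toList (pvRep pvOld3.toList pvNew3.toList
    (pvRep pvOld2.toList pvNew2.toList (pvRep pvOld1.toList pvNew1.toList s)))

lemma pvBrkFree_of_all {l : List Char} (h : l.all (fun c => !(pvIsBrk c)) = true) :
    pvBrkFree l := by
  intro c hc
  simpa using List.all_eq_true.mp h c hc

lemma pvC1 : pvOld1.toList ≠ [] ∧ pvBrkFree pvOld1.toList :=
  ⟨by decide, pvBrkFree_of_all (by decide)⟩
lemma pvC2 : pvOld2.toList ≠ [] ∧ pvBrkFree pvOld2.toList :=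
  ⟨by decide, pvBrkFree_of_all (by decide)⟩
lemma pvC3 : pvOld3.toList ≠ [] ∧ pvBrkFree pvOld3.toList :=
  ⟨by decide, pvBrkFree_of_all (by decide)⟩
lemma pvC4 : pvOld4.toList ≠ [] ∧ pvBrkFree pvOld4.toList :=
  ⟨by decide, pvBrkFree_of_all (by decide)⟩

lemma pvToList_pvSub (s : String) : (pvSub s).toList = pvSubC s.toList := by
  simp only [pvSub, pvSubC, PySem.Str.toList_replace,
    pvRep_eq_replace _ _ pvC1.1, pvRep_eq_replace _ _ pvC2.1,
    pvRep_eq_replace _ _ pvC3.1, pvRep_eq_replace _ _ pvC4.1]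

lemma pvSubC_flatten {ls : List (List Char)} (h : pvGood ls) :
    pvSubC ls.flatten = (ls.map pvSubC).flatten := by
  unfold pvSubC
  rw [pvRep_flatten _ _ pvC1.1 pvC1.2 ls h,
    pvRep_flatten _ _ pvC2.1 pvC2.2 _ (pvGood_map_rep _ _ pvC1.1 pvC1.2 h),
    pvRep_flatten _ _ pvC3.1 pvC3.2 _
      (pvGood_map_rep _ _ pvC2.1 pvC2.2 (pvGood_map_rep _ _ pvC1.1 pvC1.2 h)),
    pvRep_flatten _ _ pvC4.1 pvC4.2 _
      (pvGood_map_rep _ _ pvC3.1 pvC3.2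
        (pvGood_map_rep _ _ pvC2.1 pvC2.2 (pvGood_map_rep _ _ pvC1.1 pvC1.2 h)))]
  simp [List.map_map, Function.comp_def]

-- splitKeep facts
lemma pvSplitKeep_flatten (s : List Char) : (pvSplitKeep s).flatten = s := by
  induction s using pvSplitKeep.induct with
  | case1 => simp [pvSplitKeep]
  | case2 r ih => simp [pvSplitKeep, ih]
  | case3 c r hne hbrk ih => simp [pvSplitKeep, hbrk, ih]
  | case4 c r hne hbrk heq ih =>
    simp only [Bool.or_eq_true, decide_eq_true_eq, not_or] at hbrk
    rw [heq] at ih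
    simp only [List.flatten_nil] at ih
    subst ih
    simp [pvSplitKeep, hbrk.1, hbrk.2]
  | case5 c r hne hbrk l ls heq ih =>
    simp only [Bool.or_eq_true, decide_eq_true_eq, not_or] at hbrk
    simp [pvSplitKeep, hbrk.1, hbrk.2, heq]
    rw [heq] at ih
    simpa using ih

lemma pvGood_nil : pvGood [] := by intro l hl; simp at hl

lemma pvGood_singleton (x : List Char) : pvGood [x] := by intro l hl; simp at hl

lemma pvGood_cons {x : List Char} {xs : List (List Char)}
    (h1 : pvLastBrk x) (h2 : pvGood xs) : pvGood (x :: xs) := by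
  intro l hl
  match xs with
  | [] => simp at hl
  | y :: ys =>
    rw [List.dropLast_cons_of_ne_nil (by simp)] at hl
    rcases List.mem_cons.mp hl with rfl | hl
    · exact h1
    · exact h2 l hl

lemma pvSplitKeep_good (s : List Char) : pvGood (pvSplitKeep s) := by
  induction s using pvSplitKeep.induct with
  | case1 => exact pvGood_nil
  | case2 r ih =>
    rw [show pvSplitKeep ('\r' :: '\n' :: r) = ['\r', '\n'] :: pvSplitKeep r from by
      simp [pvSplitKeep]]
    exact pvGood_cons ⟨['\r'], '\n', rfl, rfl⟩ ih
  | case3 c r hne hbrk ih =>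
    rw [show pvSplitKeep (c :: r) = [c] :: pvSplitKeep r from by simp [pvSplitKeep, hbrk]]
    exact pvGood_cons ⟨[], c, by simpa [pvIsBrk] using hbrk, rfl⟩ ih
  | case4 c r hne hbrk heq ih =>
    simp only [Bool.or_eq_true, decide_eq_true_eq, not_or] at hbrk
    rw [show pvSplitKeep (c :: r) = [[c]] from by simp [pvSplitKeep, hbrk.1, hbrk.2, heq]]
    exact pvGood_singleton _
  | case5 c r hne hbrk l ls heq ih =>
    simp only [Bool.or_eq_true, decide_eq_true_eq, not_or] at hbrk
    rw [show pvSplitKeep (c :: r) = (c :: l) :: ls from by simp [pvSplitKeep, hbrk.1, hbrk.2, heq]]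
    rw [heq] at ih
    match ls with
    | [] => exact pvGood_singleton _
    | y :: ys =>
      refine pvGood_cons ?_ (fun x hx => ih x (by rw [List.dropLast_cons_of_ne_nil (by simp)]; simp [hx]))
      have hl : pvLastBrk l := ih l (by rw [List.dropLast_cons_of_ne_nil (by simp)]; simp)
      obtain ⟨l₀, t, ht, rfl⟩ := hl
      exact ⟨c :: l₀, t, ht, by simp⟩

lemma pvGood_take {ls : List (List Char)} (h : pvGood ls) (i : Nat) : pvGood (ls.take i) := by
  intro x hx
  apply h
  rw [List.dropLast_eq_take] at hx ⊢
  rw [List.take_take] at hx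
  have hk : min ((ls.take i).length - 1) i ≤ ls.length - 1 := by simp; omega
  rw [show min ((ls.take i).length - 1) i = min (min ((ls.take i).length - 1) i) (ls.length - 1) from (min_eq_left hk).symm, ← List.take_take] at hx
  exact List.take_subset _ _ hx

lemma pvGood_drop {ls : List (List Char)} (h : pvGood ls) (i : Nat) : pvGood (ls.drop i) := by
  intro x hx
  by_cases hi : i < ls.length
  · apply h
    rw [List.dropLast_eq_take] at hx ⊢
    rw [List.take_drop] at hx
    have : i + ((ls.drop i).length - 1) = ls.length - 1 := by simp; omega
    rw [this] at hx
    exact List.drop_subset _ _ hx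
  · rw [List.drop_eq_nil_of_le (by omega)] at hx
    simp at hx

-- the predicate both loops test
def pvP (l : String) : Bool := PySem.Str.startswith l "def patch_fix_banner"

-- A's loop, characterised by the first match position
lemma pvALoop_true (lines : List String) : ∀ out, pvALoop lines out true = out ++ lines.map pvSub := by
  induction lines with
  | nil => intro out; simp [pvALoop]
  | cons line rest ih =>
    intro out
    rw [pvALoop]
    simp only [Bool.not_true, Bool.false_and, Bool.false_eq_true, if_false]
    rw [ih]
    simp [pvSub]

lemma pvALoop_spec (lines : List String) : ∀ out,
    pvALoop lines out false = out ++
      (match lines.findIdx? pvP with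
        | none => lines.map pvSub
        | some i => (lines.take i).map pvSub ++ pvBadLine :: (lines.drop i).map pvSub) := by
  induction lines with
  | nil => intro out; simp [pvALoop]
  | cons line rest ih =>
    intro out
    rw [pvALoop, List.findIdx?_cons]
    simp only [pvP, Bool.not_false, Bool.true_and]
    by_cases hP : PySem.Str.startswith line "def patch_fix_banner" = true
    · simp only [hP, reduceIte]
      rw [pvALoop_true]
      simp [pvSub]
    · simp only [Bool.not_eq_true] at hP
      simp only [hP, Bool.false_eq_true, if_false]
      rw [ih]
      cases h : List.findIdx? pvP rest with
      | none => simp [pvSub]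
      | some i => simp [pvSub]

lemma pvBFind_spec (lines : List String) : ∀ (pre : Int),
    pvBFind lines pre = (lines.findIdx? pvP).map
      (fun i => pre + ((lines.take i).map (fun l => (l.toList.length : Int))).sum) := by
  induction lines with
  | nil => intro pre; simp [pvBFind]
  | cons line rest ih =>
    intro pre
    rw [pvBFind, List.findIdx?_cons]
    simp only [pvP]
    by_cases hP : PySem.Str.startswith line "def patch_fix_banner" = true
    · simp only [hP, reduceIte]
      simp
    · simp only [Bool.not_eq_true] at hP
      simp only [hP, Bool.false_eq_true, if_false]
      rw [ih]
      cases h : List.findIdx? pvP rest with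
      | none => simp
      | some i =>
        simp [PySem.Str.len_eq]
        ring

lemma pvInterNil : ∀ (ls : List (List Char)), ([] : List Char).intercalate ls = ls.flatten := by
  intro ls
  match ls with
  | [] => simp [List.intercalate]
  | [a] => simp [List.intercalate]
  | a :: b :: t =>
    have ih := pvInterNil (b :: t)
    simp only [List.intercalate] at ih ⊢
    rw [List.intersperse_cons₂]
    simp only [List.flatten_cons] at ih ⊢
    simp [ih]

lemma pvJoin0 (parts : List String) :
    (PySem.Str.join "" parts).toList = (parts.map String.toList).flatten := by
  rw [PySem.Str.toList_join]
  simpa [PySem.Chars.join] using pvInterNil (parts.map String.toList)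

lemma pvMapSub (xs : List (List Char)) :
    ((xs.map String.ofList).map pvSub).map String.toList = xs.map pvSubC := by
  simp only [List.map_map, Function.comp_def]
  exact List.map_congr_left (fun l _ => by rw [pvToList_pvSub]; simp)

lemma pvSumCast (xs : List (List Char)) :
    (xs.map (fun l => (l.length : Int))).sum = ((xs.map List.length).sum : Int) := by
  induction xs with
  | nil => simp
  | cons a t ih => simp [ih]

-- ===== VERDICT (by name: the statement is the Claim_ definition above) =====
theorem patch_remove_literal_patcher_spec : Claim_equal_patch_remove_literal_patcher := by
  intro txt _
  unfold Spec_patch_remove_literal_patcher patch_remove_literal_patcher patch_remove_literal_patcher_alt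
  by_cases hg : (!(PySem.Str.isIn pvOld1 txt) && !(PySem.Str.isIn pvOld4 txt)) = true
  · simp only [hg, if_true]
  · simp only [Bool.not_eq_true] at hg
    simp only [hg, Bool.false_eq_true, if_false]
    rw [pvALoop_spec, pvBFind_spec]
    have hgood : pvGood (pvSplitKeep txt.toList) := pvSplitKeep_good _
    cases h : (pvSplitKeepStr txt).findIdx? pvP with
    | none =>
      simp only [Option.map_none]
      refine String.toList_inj.mp ?_
      rw [pvJoin0, pvToList_pvSub]
      rw [show List.map pvSub (pvSplitKeepStr txt)
            = (((pvSplitKeep txt.toList).map String.ofList).map pvSub) from by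
        rw [pvSplitKeepStr]]
      simp only [List.nil_append]
      rw [pvMapSub]
      rw [← pvSubC_flatten hgood, pvSplitKeep_flatten]
    | some i =>
      simp only [Option.map_some]
      refine String.toList_inj.mp ?_
      -- names for the two chunk decompositions
      have htake : (pvSplitKeepStr txt).take i = ((pvSplitKeep txt.toList).take i).map String.ofList := by
        rw [pvSplitKeepStr, List.map_take]
      have hdrop : (pvSplitKeepStr txt).drop i = ((pvSplitKeep txt.toList).drop i).map String.ofList := by
        rw [pvSplitKeepStr, List.map_drop]
      have hS : ((( pvSplitKeepStr txt).take i).map (fun l => (l.toList.length : Int))).sum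
          = (((((pvSplitKeep txt.toList).take i).map List.length).sum : Nat) : Int) := by
        rw [htake, ← pvSumCast, List.map_map, Function.comp_def]
        simp
      set N : Nat := (((pvSplitKeep txt.toList).take i).map List.length).sum with hN
      have hslice1 : (PySem.Str.slice txt none
          (some (0 + (((pvSplitKeepStr txt).take i).map (fun l => (l.toList.length : Int))).sum))).toList
          = txt.toList.take N := by
        rw [PySem.Str.toList_slice, PySem.Chars.slice_eq_listSlice, hS]
        rw [show ((0 : Int) + (N : Int)) = ((N : Nat) : Int) by omega]
        rw [PySem.List.slice_to txt.toList (by positivity)]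
        simp
      have hslice2 : (PySem.Str.slice txt
          (some (0 + (((pvSplitKeepStr txt).take i).map (fun l => (l.toList.length : Int))).sum)) none).toList
          = txt.toList.drop N := by
        rw [PySem.Str.toList_slice, PySem.Chars.slice_eq_listSlice, hS]
        rw [show ((0 : Int) + (N : Int)) = ((N : Nat) : Int) by omega]
        rw [PySem.List.slice_from txt.toList (by positivity)]
        simp
      have hflat : txt.toList
          = ((pvSplitKeep txt.toList).take i).flatten ++ ((pvSplitKeep txt.toList).drop i).flatten := by
        conv_lhs => rw [← pvSplitKeep_flatten txt.toList]
        rw [← List.flatten_append, List.take_append_drop]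
      have hNlen : (((pvSplitKeep txt.toList).take i).flatten).length = N := by
        rw [List.length_flatten]
      have htakeN : txt.toList.take N = ((pvSplitKeep txt.toList).take i).flatten := by
        conv_lhs => rw [hflat]
        exact List.take_left' hNlen
      have hdropN : txt.toList.drop N = ((pvSplitKeep txt.toList).drop i).flatten := by
        conv_lhs => rw [hflat]
        exact List.drop_left' hNlen
      rw [String.toList_append, String.toList_append, pvToList_pvSub, pvToList_pvSub,
        hslice1, hslice2, htakeN, hdropN,
        pvSubC_flatten (pvGood_take hgood i), pvSubC_flatten (pvGood_drop hgood i)]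
      rw [pvJoin0]
      rw [htake, hdrop]
      simp only [List.nil_append, List.map_append, List.map_cons, List.flatten_append,
        List.flatten_cons, pvMapSub]
      simp
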